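-- pv_equiv track=rewrite | github.com/jay-taylor/charliepy | charliepy/utils/combinat.py | centralisertuple
-- ===== SOURCE A (Python) =====
-- def centralisertuple(n, r, mu): #pycox
--     """returns the order of the centraliser of an element of a given type
--     (specified by an r-tuple of partitions mu) in the wreath product of a cyclic
--     group of order r with the full symmetric group of degree n. (The program is
--     taken from the GAP library and re-written almost 1-1 in python.)
--     """
--     res = 1
--     for i in range(r):
--         last, k = 0, 1
--
--         for p in mu[i]:
--             res *= r*p
--             if p == last:
--                 k += 1
--                 res *= k
--             else:
--                 k = 1
--             last = p
--
--     return res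
-- ===== SOURCE B (Python) =====
-- def centralisertuple(n, r, mu):
--     """Centraliser order in C_r wr S_n for the type given by the r-tuple of
--     partitions mu: group maximal runs of equal consecutive parts; a run of
--     L parts equal to p contributes (r*p)**L * L!."""
--     res = 1
--     for i in range(r):
--         row = mu[i]
--         j = 0
--         while j < len(row):
--             k = j
--             while k < len(row) and row[k] == row[j]:
--                 k += 1
--             L = k - j
--             f = 1
--             for t in range(2, L + 1):
--                 f *= t
--             res *= (r * row[j]) ** L * f
--             j = k
--     return res
-- ===== Notes on version B (the rewrite author's own statement) =====
-- stated objective: alternative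
-- what changed: B groups each partition into maximal runs of equal consecutive parts and multiplies in a closed per-run factor (r*p)**L * L!, instead of A's per-element accumulator with last/k state.
import Mathlib
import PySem

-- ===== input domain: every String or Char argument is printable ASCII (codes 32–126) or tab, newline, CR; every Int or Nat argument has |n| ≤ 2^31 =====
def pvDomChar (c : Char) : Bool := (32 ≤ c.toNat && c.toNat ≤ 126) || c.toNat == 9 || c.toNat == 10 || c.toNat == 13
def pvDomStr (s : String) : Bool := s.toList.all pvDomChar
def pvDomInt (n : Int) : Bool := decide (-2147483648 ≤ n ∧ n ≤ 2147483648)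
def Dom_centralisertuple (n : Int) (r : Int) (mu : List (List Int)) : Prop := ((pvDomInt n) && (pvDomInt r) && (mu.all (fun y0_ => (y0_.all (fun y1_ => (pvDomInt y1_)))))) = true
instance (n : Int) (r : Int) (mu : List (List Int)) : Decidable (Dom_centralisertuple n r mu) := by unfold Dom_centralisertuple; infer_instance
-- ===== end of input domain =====

-- B groups maximal runs of equal consecutive parts and multiplies a closed per-run
-- factor (r*p)^L * L!, instead of A's per-element accumulator with last/k state.

-- ===== PORT A =====
-- inner-loop body of A: state (res, last, k)
def pvStepA (r : Int) (st : Int × Int × Int) (p : Int) : Int × Int × Int :=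
  let res := st.1 * (r * p)
  if p == st.2.1 then (res * (st.2.2 + 1), p, st.2.2 + 1) else (res, p, 1)

def centralisertuple (n : Int) (r : Int) (mu : List (List Int)) : Int :=
  (PySem.List.pyRange 0 r 1).foldl (fun res i =>
    (((PySem.List.pyGet? mu i).getD []).foldl (pvStepA r) (res, 0, 1)).1) 1

-- ===== PORT B =====
-- the inner while-loop: length of the maximal run of v at the front, and the rest
def pvTakeRun (v : Int) : List Int → Nat × List Int
  | [] => (0, [])
  | x :: xs => if x = v then ((pvTakeRun v xs).1 + 1, (pvTakeRun v xs).2) else (0, x :: xs)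

theorem pvTakeRun_len (v : Int) (xs : List Int) : (pvTakeRun v xs).2.length ≤ xs.length := by
  induction xs with
  | nil => simp [pvTakeRun]
  | cons x xs ih =>
    simp only [pvTakeRun]
    split
    · exact Nat.le_succ_of_le ih
    · simp

-- Source B's factorial loop (f = 2*3*...*L)
def pvFact : Nat → Int
  | 0 => 1
  | m + 1 => pvFact m * (m + 1)

-- the outer while-loop over one row: product of (r*p)^L * L! over maximal runs
def pvRowFactor (r : Int) : List Int → Int
  | [] => 1
  | x :: xs =>
    (r * x) ^ ((pvTakeRun x xs).1 + 1) * pvFact ((pvTakeRun x xs).1 + 1)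
      * pvRowFactor r (pvTakeRun x xs).2
termination_by row => row.length
decreasing_by
  exact Nat.lt_succ_of_le (pvTakeRun_len _ _)

def centralisertuple_alt (n : Int) (r : Int) (mu : List (List Int)) : Int :=
  (PySem.List.pyRange 0 r 1).foldl (fun res i =>
    res * pvRowFactor r ((PySem.List.pyGet? mu i).getD [])) 1

-- ===== PRECONDITION & SPEC =====
-- Python A raises IndexError on mu[i] when r exceeds the number of partitions.
def Pre_centralisertuple (n : Int) (r : Int) (mu : List (List Int)) : Prop :=
  r ≤ (mu.length : Int)
instance (n : Int) (r : Int) (mu : List (List Int)) : Decidable (Pre_centralisertuple n r mu) := by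
  unfold Pre_centralisertuple; infer_instance

def pvWitness_centralisertuple : Int × Int × List (List Int) := (5, 2, [[2, 2, 1], [3]])

def Spec_centralisertuple (n : Int) (r : Int) (mu : List (List Int)) (out : Int) : Prop := out = centralisertuple_alt n r mu
instance (n : Int) (r : Int) (mu : List (List Int)) (out : Int) : Decidable (Spec_centralisertuple n r mu out) := by unfold Spec_centralisertuple; infer_instance

-- ===== CLAIM (what is proved, stated in full; the proofs are below) =====
def Claim_equal_centralisertuple : Prop := ∀ (n : Int) (r : Int) (mu : List (List Int)), Dom_centralisertuple n r mu → Pre_centralisertuple n r mu → Spec_centralisertuple n r mu (centralisertuple n r mu)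

-- ===== LEMMAS AND PROOFS =====

-- rising product (k+1)(k+2)...(k+L)
def pvRise (k : Int) : Nat → Int
  | 0 => 1
  | l + 1 => (k + 1) * pvRise (k + 1) l

theorem pvFact_rise (l k : Nat) : pvFact k * pvRise (k : Int) l = pvFact (k + l) := by
  induction l generalizing k with
  | zero => simp [pvRise]
  | succ l ih =>
    have h : ((k : Int) + 1) = ((k + 1 : Nat) : Int) := by push_cast; ring
    calc pvFact k * pvRise (k : Int) (l + 1)
        = (pvFact k * ((k : Int) + 1)) * pvRise ((k : Int) + 1) l := by
          simp [pvRise]; ring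
      _ = pvFact (k + 1) * pvRise ((k + 1 : Nat) : Int) l := by rw [h]; rfl
      _ = pvFact (k + 1 + l) := ih (k + 1)
      _ = pvFact (k + (l + 1)) := by ring_nf

theorem pvRise_one (l : Nat) : pvRise 1 l = pvFact (l + 1) := by
  have := pvFact_rise l 1
  simpa [pvFact, Nat.add_comm] using this

theorem pvTakeRun_rest_head (v : Int) (xs : List Int) :
    (pvTakeRun v xs).2.head? ≠ some v := by
  induction xs with
  | nil => simp [pvTakeRun]
  | cons x xs ih =>
    simp only [pvTakeRun]
    split
    · exact ih
    · simpa using fun h => by simp_all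

-- once res hits 0 in A's inner loop it stays 0
theorem pvStepA_zero (r : Int) (xs : List Int) (st : Int × Int × Int) (h : st.1 = 0) :
    (xs.foldl (pvStepA r) st).1 = 0 := by
  induction xs generalizing st with
  | nil => exact h
  | cons x xs ih =>
    apply ih
    simp [pvStepA, h]
    split <;> simp

-- consuming a maximal run of x from state (res, x, k)
theorem pvStepA_run (r x : Int) (xs : List Int) (res k : Int) :
    xs.foldl (pvStepA r) (res, x, k) =
      (pvTakeRun x xs).2.foldl (pvStepA r)
        (res * (r * x) ^ (pvTakeRun x xs).1 * pvRise k (pvTakeRun x xs).1,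
          x, k + ((pvTakeRun x xs).1 : Int)) := by
  induction xs generalizing res k with
  | nil => simp [pvTakeRun, pvRise]
  | cons y ys ih =>
    by_cases hy : y = x
    · subst hy
      have hTR : pvTakeRun y (y :: ys) = ((pvTakeRun y ys).1 + 1, (pvTakeRun y ys).2) := by
        simp [pvTakeRun]
      have h1 : pvStepA r (res, y, k) y = (res * (r * y) * (k + 1), y, k + 1) := by
        simp [pvStepA]
      rw [List.foldl_cons, h1, ih (res * (r * y) * (k + 1)) (k + 1), hTR]
      have hres : res * (r * y) * (k + 1) * (r * y) ^ (pvTakeRun y ys).1 * pvRise (k + 1) (pvTakeRun y ys).1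
          = res * (r * y) ^ ((pvTakeRun y ys).1 + 1) * pvRise k ((pvTakeRun y ys).1 + 1) := by
        simp [pow_succ, pvRise]; ring
      have hk : k + 1 + ((pvTakeRun y ys).1 : Int) = k + (((pvTakeRun y ys).1 + 1 : Nat) : Int) := by
        push_cast; ring
      rw [hres, hk]
    · simp only [pvTakeRun, if_neg hy, pow_zero, pvRise, mul_one, Int.natCast_zero, add_zero]

-- A's inner loop from a fresh state equals res times B's per-row factor,
-- provided the first part differs from `last`
theorem pvInner_eq (r : Int) (row : List Int) (res last k : Int)
    (h : row.head? ≠ some last) :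
    (row.foldl (pvStepA r) (res, last, k)).1 = res * pvRowFactor r row := by
  match row with
  | [] => simp [pvRowFactor]
  | x :: xs =>
    have hx : x ≠ last := by simpa using h
    have h1 : pvStepA r (res, last, k) x = (res * (r * x), x, 1) := by
      simp [pvStepA, hx]
    rw [List.foldl_cons, h1, pvStepA_run]
    rw [pvInner_eq r (pvTakeRun x xs).2 _ x _ (pvTakeRun_rest_head x xs)]
    show res * (r * x) * (r * x) ^ (pvTakeRun x xs).1 * pvRise 1 (pvTakeRun x xs).1
        * pvRowFactor r (pvTakeRun x xs).2 = res * pvRowFactor r (x :: xs)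
    rw [pvRise_one]
    simp only [pvRowFactor]
    rw [pow_succ]
    ring
termination_by row.length
decreasing_by
  exact Nat.lt_succ_of_le (pvTakeRun_len _ _)

-- the two per-index loop bodies agree on every row
theorem pvBody_eq (r : Int) (row : List Int) (res : Int) :
    (row.foldl (pvStepA r) (res, 0, 1)).1 = res * pvRowFactor r row := by
  by_cases h : row.head? = some 0
  · match row, h with
    | 0 :: xs, _ =>
      have h1 : pvStepA r (res, 0, 1) 0 = (res * (r * 0) * (1 + 1), 0, 1 + 1) := by
        simp [pvStepA]
      rw [List.foldl_cons, h1, pvStepA_zero r xs _ (by ring)]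
      simp only [pvRowFactor]
      rw [mul_zero, zero_pow (Nat.succ_ne_zero _)]
      ring
  · exact pvInner_eq r row res 0 1 h

theorem pvFold_eq (r : Int) (l : List Int) (mu : List (List Int)) (res : Int) :
    l.foldl (fun res i =>
      (((PySem.List.pyGet? mu i).getD []).foldl (pvStepA r) (res, 0, 1)).1) res =
    l.foldl (fun res i =>
      res * pvRowFactor r ((PySem.List.pyGet? mu i).getD [])) res := by
  induction l generalizing res with
  | nil => rfl
  | cons i l ih => rw [List.foldl_cons, List.foldl_cons, pvBody_eq]; exact ih _

-- ===== VERDICT (by name: the statement is the Claim_ definition above) =====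
theorem centralisertuple_spec : Claim_equal_centralisertuple := by
  intro n r mu _ _
  unfold Spec_centralisertuple centralisertuple centralisertuple_alt
  exact pvFold_eq r _ mu 1
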